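-- pv_equiv track=rewrite | github.com/Forte-NaoP/Problem-Solving | 프로그래머스/3/43164. 여행경로/여행경로.py | solution
-- ===== SOURCE A (Python) =====
-- from collections import defaultdict
--
-- def solution(tickets):
--     port = defaultdict(list)
--
--     for src, dst in tickets:
--         port[src].append(dst)
--
--     for k in port.keys():
--         port[k].sort(reverse=True)
--
--     route = []
--     st = ["ICN"]
--     cur = "ICN"
--     while st:
--         cur = st[-1]
--         if port[cur]:
--             nxt = port[cur].pop()
--             st.append(nxt)
--         else:
--             route.append(st.pop())
--
--     return route[::-1]
-- ===== SOURCE B (Python) =====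
-- from collections import defaultdict
--
-- def solution(tickets):
--     port = defaultdict(list)
--     for src, dst in tickets:
--         port[src].append(dst)
--     for k in port.keys():
--         port[k].sort()
--
--     route = []
--
--     def dfs(node):
--         dests = port[node]
--         while dests:
--             dfs(dests.pop(0))
--         route.append(node)
--
--     dfs("ICN")
--     return route[::-1]
-- ===== Notes on version B (the rewrite author's own statement) =====
-- stated objective: alternative
-- what changed: Replaces A's explicit-stack iterative Hierholzer (descending-sorted adjacency lists consumed by pop() from the end, with a while loop inspecting the stack top) by a recursive Hierholzer dfs over ascending-sorted adjacency lists consumed from the front, appending each node post-order.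
import Mathlib
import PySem

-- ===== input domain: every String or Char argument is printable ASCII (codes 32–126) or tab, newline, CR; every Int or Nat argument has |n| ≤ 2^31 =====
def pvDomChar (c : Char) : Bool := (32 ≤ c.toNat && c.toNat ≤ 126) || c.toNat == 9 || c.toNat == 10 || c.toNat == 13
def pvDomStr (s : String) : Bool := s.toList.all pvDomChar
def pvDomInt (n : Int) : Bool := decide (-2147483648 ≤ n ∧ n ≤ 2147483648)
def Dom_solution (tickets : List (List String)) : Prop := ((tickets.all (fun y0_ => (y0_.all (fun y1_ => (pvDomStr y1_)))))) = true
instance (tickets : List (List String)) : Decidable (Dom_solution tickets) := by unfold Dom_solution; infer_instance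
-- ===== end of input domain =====

-- B replaces A's explicit-stack iterative Hierholzer walk by a recursive dfs with post-order
-- appends (same greedy smallest-edge choice, sorted ascending and consumed from the front);
-- alternative decomposition, no speed claim.

-- ===== PORT A =====

-- for src, dst in tickets: port[src].append(dst)   (rows not of length 2 raise ValueError: excluded by Pre_)
def buildPortA (tickets : List (List String)) : PySem.Dict String (List String) :=
  tickets.foldl (fun d t =>
    match t with
    | [src, dst] => d.modify src [] (fun l => l ++ [dst])
    | _ => d) PySem.Dict.empty

-- for k in port.keys(): port[k].sort(reverse=True)
def sortPortA (d : PySem.Dict String (List String)) : PySem.Dict String (List String) :=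
  d.keys.foldl (fun a k => a.modify k [] (fun l => PySem.List.sorted l id true)) d

-- the while loop; the stack is kept head-as-top (Python appends/pops at the right end).
-- The fuel argument is a totality guard only: each iteration pops one ticket edge or pops the
-- stack, so the loop runs at most 2*len(tickets)+1 iterations and the fuel passed below never
-- runs out; on exhaustion the accumulated route is returned.
def loopA (f : Nat) (d : PySem.Dict String (List String)) (st route : List String) : List String :=
  match f, st with
  | 0, _ => route
  | _ + 1, [] => route
  | f + 1, cur :: rest =>
    let l := d.getD cur []
    if hne : l = [] then
      loopA f d rest (route ++ [cur])          -- route.append(st.pop())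
    else
      loopA f (d.insert cur l.dropLast) (l.getLast hne :: cur :: rest) route
        -- nxt = port[cur].pop(); st.append(nxt)

def solution (tickets : List (List String)) : List String :=
  (loopA (2 * tickets.length + 2) (sortPortA (buildPortA tickets)) ["ICN"] []).reverse

-- ===== PORT B =====

-- for src, dst in tickets: port[src].append(dst)
def buildPortB (tickets : List (List String)) : PySem.Dict String (List String) :=
  tickets.foldl (fun d t =>
    match t with
    | [src, dst] => d.modify src [] (fun l => l ++ [dst])
    | _ => d) PySem.Dict.empty

-- for k in port.keys(): port[k].sort()
def sortPortB (d : PySem.Dict String (List String)) : PySem.Dict String (List String) :=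
  d.keys.foldl (fun a k => a.modify k [] (fun l => PySem.List.sorted l id)) d

-- def dfs(node): while port[node]: dfs(port[node].pop(0)); route.append(node)
-- The fuel is a totality guard only (one unit per call; B makes at most 2*len(tickets)+1 calls);
-- the subtype bound p.1 ≤ f is termination machinery: it records the unspent fuel so the
-- continuation of the while loop is a smaller recursive call.
def dfsBAux (f : Nat) (d : PySem.Dict String (List String)) (node : String)
    (route : List String) :
    {p : Nat × PySem.Dict String (List String) × List String // p.1 ≤ f} :=
  match f with
  | 0 => ⟨(0, d, route), Nat.le_refl 0⟩
  | f + 1 =>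
    match d.getD node [] with
    | [] => ⟨(f, d, route ++ [node]), by omega⟩            -- route.append(node)
    | x :: tl =>
      let p := dfsBAux f (d.insert node tl) x route        -- dfs(port[node].pop(0))
      let q := dfsBAux p.1.1 p.1.2.1 node p.1.2.2          -- continue the while loop
      ⟨q.1, le_trans (le_trans q.2 p.2) (Nat.le_succ f)⟩
termination_by f
decreasing_by
  · omega
  · exact Nat.lt_succ_of_le p.2

def dfsB (f : Nat) (d : PySem.Dict String (List String)) (node : String)
    (route : List String) : Nat × PySem.Dict String (List String) × List String :=
  (dfsBAux f d node route).1

def solution_alt (tickets : List (List String)) : List String :=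
  ((dfsB (2 * tickets.length + 2) (sortPortB (buildPortB tickets)) "ICN" []).2.2).reverse

-- ===== PRECONDITION & SPEC =====
-- Pre_ excludes exactly the rows Python cannot unpack as 'src, dst': on a row whose length is
-- not 2 both Pythons raise ValueError.
def Pre_solution (tickets : List (List String)) : Prop := ∀ t ∈ tickets, t.length = 2
instance (tickets : List (List String)) : Decidable (Pre_solution tickets) := by
  unfold Pre_solution; infer_instance

def pvWitness_solution : List (List String) :=
  [["ICN", "BBB"], ["BBB", "AAA"], ["ICN", "AAA"], ["AAA", "ICN"]]

def Spec_solution (tickets : List (List String)) (out : List String) : Prop := out = solution_alt tickets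
instance (tickets : List (List String)) (out : List String) : Decidable (Spec_solution tickets out) := by unfold Spec_solution; infer_instance

-- ===== CLAIM (what is proved, stated in full; the proofs are below) =====
def Claim_equal_solution : Prop := ∀ (tickets : List (List String)), Dom_solution tickets → Pre_solution tickets → Spec_solution tickets (solution tickets)

-- ===== LEMMAS AND PROOFS =====

-- Python's sort(reverse=True) on strings is the reverse of the ascending sort.
theorem sorted_rev_eq_reverse (l : List String) :
    PySem.List.sorted l id true = (PySem.List.sorted l id).reverse :=
  List.Perm.eq_of_pairwise (le := fun a b : String => b ≤ a)
    (fun _ _ _ _ h1 h2 => le_antisymm h2 h1)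
    (PySem.List.sorted_pairwise_rev l id)
    ((List.pairwise_reverse).2 (PySem.List.sorted_pairwise l id))
    (((PySem.List.sorted_perm l id true).trans (PySem.List.sorted_perm l id false).symm).trans
      (List.reverse_perm _).symm)

-- the two builds are the same grouping loop
theorem buildPortB_eq (tickets : List (List String)) :
    buildPortB tickets = buildPortA tickets := rfl

-- keys stay Nodup through the grouping fold
theorem nodup_keys_buildPortA (tickets : List (List String)) :
    (buildPortA tickets).keys.Nodup := by
  unfold buildPortA
  suffices h : ∀ (ts : List (List String)) (d : PySem.Dict String (List String)),
      d.keys.Nodup →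
      (ts.foldl (fun d t =>
        match t with
        | [src, dst] => d.modify src [] (fun l => l ++ [dst])
        | _ => d) d).keys.Nodup by
    exact h tickets PySem.Dict.empty (by simp [PySem.Dict.keys_empty])
  intro ts
  induction ts with
  | nil => intro d hd; simpa using hd
  | cons t ts ih =>
    intro d hd
    simp only [List.foldl_cons]
    apply ih
    match t with
    | [] => exact hd
    | [_] => exact hd
    | [src, dst] =>
      have := PySem.Dict.keys_modify d src [] (fun l => l ++ [dst])
      have h2 := PySem.Dict.nodup_keys_insert d src ((d.getD src []) ++ [dst]) hd
      simpa [this] using h2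
    | _ :: _ :: _ :: _ => exact hd

-- a 'for k in keys: d[k] = f(d[k])' pass, read back through getD
theorem getD_foldl_modify (f : List String → List String) (ks : List String)
    (hnd : ks.Nodup) :
    ∀ (a : PySem.Dict String (List String)) (k : String),
      ((ks.foldl (fun a kk => a.modify kk [] f) a).getD k []) =
        if k ∈ ks then f (a.getD k []) else a.getD k [] := by
  induction ks with
  | nil => intro a k; simp
  | cons kk ks ih =>
    intro a k
    simp only [List.foldl_cons]
    obtain ⟨hkk, hnd'⟩ := List.nodup_cons.1 hnd
    rw [ih hnd']
    by_cases hmem : k ∈ ks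
    · have hne : k ≠ kk := by rintro rfl; exact hkk hmem
      simp [hmem, hne, PySem.Dict.getD_modify_of_ne a [] f hne]
    · by_cases heq : k = kk
      · subst heq
        simp [hmem, PySem.Dict.getD_modify_self]
      · simp [hmem, heq, PySem.Dict.getD_modify_of_ne a [] f heq]

-- keys are unchanged as a Nodup list by the sorting pass
theorem nodup_keys_sortfold (f : List String → List String) (ks : List String) :
    ∀ (a : PySem.Dict String (List String)), a.keys.Nodup →
      ((ks.foldl (fun a kk => a.modify kk [] f) a)).keys.Nodup := by
  induction ks with
  | nil => intro a ha; simpa using ha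
  | cons kk ks ih =>
    intro a ha
    simp only [List.foldl_cons]
    apply ih
    have := PySem.Dict.keys_modify a kk [] f
    have h2 := PySem.Dict.nodup_keys_insert a kk (f (a.getD kk [])) ha
    simpa [this] using h2

-- the initial dictionaries of the two ports are mirror images of each other
theorem related_init (tickets : List (List String)) (k : String) :
    (sortPortA (buildPortA tickets)).getD k [] =
      ((sortPortB (buildPortB tickets)).getD k []).reverse := by
  rw [buildPortB_eq]
  unfold sortPortA sortPortB
  have hnd := nodup_keys_buildPortA tickets
  rw [getD_foldl_modify _ _ hnd, getD_foldl_modify _ _ hnd]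
  by_cases hmem : k ∈ (buildPortA tickets).keys
  · simp [hmem, sorted_rev_eq_reverse]
  · have hc : (buildPortA tickets).contains k = false := by
      rcases h : (buildPortA tickets).contains k with _ | _
      · rfl
      · exact absurd ((PySem.Dict.contains_iff_mem_keys _ _).1 h) hmem
    simp [hmem, PySem.Dict.getD_of_not_contains _ _ hc]

-- unfolding equations for dfsB
theorem dfsB_zero (d : PySem.Dict String (List String)) (n : String) (r : List String) :
    dfsB 0 d n r = (0, d, r) := by
  unfold dfsB dfsBAux
  rfl

theorem dfsB_succ_nil (f : Nat) (d : PySem.Dict String (List String)) (n : String)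
    (r : List String) (h : d.getD n [] = []) :
    dfsB (f + 1) d n r = (f, d, r ++ [n]) := by
  unfold dfsB dfsBAux
  simp [h]

theorem dfsB_succ_cons (f : Nat) (d : PySem.Dict String (List String)) (n : String)
    (r : List String) (x : String) (tl : List String) (h : d.getD n [] = x :: tl) :
    dfsB (f + 1) d n r =
      dfsB (dfsB f (d.insert n tl) x r).1 (dfsB f (d.insert n tl) x r).2.1 n
        (dfsB f (d.insert n tl) x r).2.2 := by
  conv_lhs => unfold dfsB dfsBAux
  simp only [h]
  rfl

theorem dfsB_fuel_le (f : Nat) (d : PySem.Dict String (List String)) (n : String)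
    (r : List String) : (dfsB f d n r).1 ≤ f :=
  (dfsBAux f d n r).2

-- dfsB keeps the keys Nodup
theorem dfsB_nodup (f : Nat) :
    ∀ (d : PySem.Dict String (List String)) (n : String) (r : List String),
      d.keys.Nodup → (dfsB f d n r).2.1.keys.Nodup := by
  induction f using Nat.strong_induction_on with
  | _ f IH =>
    intro d n r hd
    match f with
    | 0 => simpa [dfsB_zero] using hd
    | f + 1 =>
      rcases h : d.getD n [] with _ | ⟨x, tl⟩
      · rw [dfsB_succ_nil f d n r h]; exact hd
      · rw [dfsB_succ_cons f d n r x tl h]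
        exact IH _ (Nat.lt_succ_of_le (dfsB_fuel_le f _ x r)) _ n _
          (IH f (Nat.lt_succ_self f) _ x r (PySem.Dict.nodup_keys_insert d n tl hd))

theorem loopA_nil (f : Nat) (d : PySem.Dict String (List String)) (r : List String) :
    loopA f d [] r = r := by
  match f with
  | 0 => rfl
  | _ + 1 => rfl

-- the simulation: one frame of A's explicit stack is one call of B's dfs
theorem sim (f : Nat) :
    ∀ (dB dA : PySem.Dict String (List String)) (cur : String) (rest route : List String),
      dB.keys.Nodup →
      (∀ k, dA.getD k [] = (dB.getD k []).reverse) →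
      ∃ dA' : PySem.Dict String (List String),
        (∀ k, dA'.getD k [] = ((dfsB f dB cur route).2.1.getD k []).reverse) ∧
        loopA f dA (cur :: rest) route =
          loopA (dfsB f dB cur route).1 dA' rest (dfsB f dB cur route).2.2 := by
  induction f using Nat.strong_induction_on with
  | _ f IH =>
    intro dB dA cur rest route hnd hrel
    match f with
    | 0 =>
      refine ⟨dA, ?_, ?_⟩
      · intro k; rw [dfsB_zero]; exact hrel k
      · rw [dfsB_zero]
        rfl
    | f + 1 =>
      rcases h : dB.getD cur [] with _ | ⟨x, tl⟩
      · -- both lists empty: A pops the stack, B appends post-order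
        have hA : dA.getD cur [] = [] := by rw [hrel cur, h]; rfl
        refine ⟨dA, ?_, ?_⟩
        · intro k; rw [dfsB_succ_nil f dB cur route h]; exact hrel k
        · rw [dfsB_succ_nil f dB cur route h]
          simp only [loopA, hA]
          rfl
      · -- B pops x from the front; A pops x from the back of the reversed list
        have hA : dA.getD cur [] = tl.reverse ++ [x] := by
          rw [hrel cur, h, List.reverse_cons]
        have hne : dA.getD cur [] ≠ [] := by rw [hA]; simp
        have hstep : loopA (f + 1) dA (cur :: rest) route =
            loopA f (dA.insert cur tl.reverse) (x :: cur :: rest) route := by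
          conv_lhs => unfold loopA
          rw [dif_neg hne]
          congr 1
          · rw [hA, List.dropLast_concat]
          · congr 1
            have : (dA.getD cur []).getLast hne =
                ((tl.reverse ++ [x]).getLast (by simp)) := by
              congr 1
            rw [this, List.getLast_concat]
        have hrel1 : ∀ k, (dA.insert cur tl.reverse).getD k [] =
            ((dB.insert cur tl).getD k []).reverse := by
          intro k
          rw [PySem.Dict.getD_insert, PySem.Dict.getD_insert]
          by_cases hk : k = cur
          · simp [hk]
          · simp [hk, hrel k]
        obtain ⟨dA1, hrelA1, heq1⟩ :=
          IH f (Nat.lt_succ_self f) (dB.insert cur tl) (dA.insert cur tl.reverse) x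
            (cur :: rest) route (PySem.Dict.nodup_keys_insert dB cur tl hnd) hrel1
        obtain ⟨dA2, hrelA2, heq2⟩ :=
          IH (dfsB f (dB.insert cur tl) x route).1
            (Nat.lt_succ_of_le (dfsB_fuel_le f _ x route))
            (dfsB f (dB.insert cur tl) x route).2.1 dA1 cur rest
            (dfsB f (dB.insert cur tl) x route).2.2
            (dfsB_nodup f _ x route (PySem.Dict.nodup_keys_insert dB cur tl hnd)) hrelA1
        refine ⟨dA2, ?_, ?_⟩
        · intro k; rw [dfsB_succ_cons f dB cur route x tl h]; exact hrelA2 k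
        · rw [dfsB_succ_cons f dB cur route x tl h, hstep, heq1, heq2]

-- ===== VERDICT (by name: the statement is the Claim_ definition above) =====
theorem solution_spec : Claim_equal_solution := by
  intro tickets _ _
  unfold Spec_solution solution solution_alt
  obtain ⟨dA', _, heq⟩ :=
    sim (2 * tickets.length + 2) (sortPortB (buildPortB tickets))
      (sortPortA (buildPortA tickets)) "ICN" [] []
      (by rw [buildPortB_eq]; exact nodup_keys_sortfold _ _ _ (nodup_keys_buildPortA tickets))
      (related_init tickets)
  rw [heq, loopA_nil]
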